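-- pv_equiv track=rewrite | github.com/yisunlp/AngelSlim | tools/convert_hy3_hf457_to_hf5.py | ordered_config
-- ===== SOURCE A (Python) =====
-- CONFIG_KEY_ORDER = [
--     "architectures",
--     "bos_token_id",
--     "enable_attention_fp32_softmax",
--     "enable_lm_head_fp32",
--     "enable_moe_fp32_combine",
--     "eod_token_id",
--     "eos_token_id",
--     "expert_hidden_dim",
--     "moe_intermediate_size",
--     "first_k_dense_replace",
--     "head_dim",
--     "hidden_act",
--     "hidden_size",
--     "initializer_range",
--     "intermediate_size",
--     "max_position_embeddings",
--     "model_type",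
--     "moe_router_enable_expert_bias",
--     "moe_router_use_sigmoid",
--     "num_attention_heads",
--     "num_experts",
--     "num_experts_per_tok",
--     "num_hidden_layers",
--     "num_key_value_heads",
--     "num_shared_experts",
--     "output_router_logits",
--     "pad_token_id",
--     "qk_norm",
--     "rms_norm_eps",
--     "rope_parameters",
--     "route_norm",
--     "router_scaling_factor",
--     "sep_token_id",
--     "tie_word_embeddings",
--     "transformers_version",
--     "use_cache",
--     "use_grouped_mm",
--     "vocab_size",
-- ]
--
-- def ordered_config(config):
--     ordered = {}
--     for key in CONFIG_KEY_ORDER: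
--         if key in config:
--             ordered[key] = config[key]
--     for key in sorted(config):
--         if key not in ordered:
--             ordered[key] = config[key]
--     return ordered
-- ===== SOURCE B (Python) =====
-- CONFIG_KEY_ORDER = [
--     "architectures",
--     "bos_token_id",
--     "enable_attention_fp32_softmax",
--     "enable_lm_head_fp32",
--     "enable_moe_fp32_combine",
--     "eod_token_id",
--     "eos_token_id",
--     "expert_hidden_dim",
--     "moe_intermediate_size",
--     "first_k_dense_replace",
--     "head_dim",
--     "hidden_act",
--     "hidden_size",
--     "initializer_range",
--     "intermediate_size",
--     "max_position_embeddings",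
--     "model_type",
--     "moe_router_enable_expert_bias",
--     "moe_router_use_sigmoid",
--     "num_attention_heads",
--     "num_experts",
--     "num_experts_per_tok",
--     "num_hidden_layers",
--     "num_key_value_heads",
--     "num_shared_experts",
--     "output_router_logits",
--     "pad_token_id",
--     "qk_norm",
--     "rms_norm_eps",
--     "rope_parameters",
--     "route_norm",
--     "router_scaling_factor",
--     "sep_token_id",
--     "tie_word_embeddings",
--     "transformers_version",
--     "use_cache",
--     "use_grouped_mm",
--     "vocab_size",
-- ]
--
--
-- def ordered_config(config):
--     n = len(CONFIG_KEY_ORDER)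
--     rank = {k: i for i, k in enumerate(CONFIG_KEY_ORDER)}
--     keys = sorted(config, key=lambda k: (rank[k], "") if k in rank else (n, k))
--     return {k: config[k] for k in keys}
-- ===== Notes on version B (the rewrite author's own statement) =====
-- stated objective: idiomatic
-- what changed: Replaces the two explicit insertion loops (priority scan, then a sorted-remainder scan with a membership test) by one combined sort: a rank table built once from CONFIG_KEY_ORDER and a single sorted() call whose key tuple puts priority keys first in list order and everything else after, alphabetically.
import Mathlib
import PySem

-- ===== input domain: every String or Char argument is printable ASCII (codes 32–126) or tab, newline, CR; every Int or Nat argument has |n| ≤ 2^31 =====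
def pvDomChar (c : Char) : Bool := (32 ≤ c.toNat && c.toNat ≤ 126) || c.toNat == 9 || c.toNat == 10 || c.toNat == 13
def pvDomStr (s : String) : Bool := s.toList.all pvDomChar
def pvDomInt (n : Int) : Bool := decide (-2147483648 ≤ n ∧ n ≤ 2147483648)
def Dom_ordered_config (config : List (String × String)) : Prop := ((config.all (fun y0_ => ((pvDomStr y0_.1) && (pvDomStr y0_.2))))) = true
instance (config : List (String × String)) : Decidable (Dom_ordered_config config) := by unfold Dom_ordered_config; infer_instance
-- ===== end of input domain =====

-- B replaces A's two insertion loops by one combined sort (rank table + single sorted() with a tuple key); same cost, more idiomatic.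


-- ===== PORT A =====
def CONFIG_KEY_ORDER : List String := [
  "architectures", "bos_token_id", "enable_attention_fp32_softmax", "enable_lm_head_fp32",
  "enable_moe_fp32_combine", "eod_token_id", "eos_token_id", "expert_hidden_dim",
  "moe_intermediate_size", "first_k_dense_replace", "head_dim", "hidden_act", "hidden_size",
  "initializer_range", "intermediate_size", "max_position_embeddings", "model_type",
  "moe_router_enable_expert_bias", "moe_router_use_sigmoid", "num_attention_heads",
  "num_experts", "num_experts_per_tok", "num_hidden_layers", "num_key_value_heads",
  "num_shared_experts", "output_router_logits", "pad_token_id", "qk_norm", "rms_norm_eps",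
  "rope_parameters", "route_norm", "router_scaling_factor", "sep_token_id",
  "tie_word_embeddings", "transformers_version", "use_cache", "use_grouped_mm", "vocab_size"]

-- 'config' is a Python dict (association list, first match); 'key in config' / 'config[key]' go through PySem.Dict.
def ordered_config (config : List (String × String)) : List (String × String) :=
  let d : PySem.Dict String String := PySem.Dict.mk config
  let ordered1 : PySem.Dict String String :=
    CONFIG_KEY_ORDER.foldl (fun o key =>
      match d.get? key with
      | some v => o.insert key v
      | none => o) PySem.Dict.empty
  let ordered2 : PySem.Dict String String :=
    (PySem.List.sorted d.keys (fun x => x)).foldl (fun o key =>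
      if o.contains key then o
      else
        match d.get? key with   -- config[key]; key comes from config, so always present
        | some v => o.insert key v
        | none => o) ordered1
  ordered2.items

-- ===== PORT B =====
def ordered_config_alt (config : List (String × String)) : List (String × String) :=
  let d : PySem.Dict String String := PySem.Dict.mk config
  let n : Int := (CONFIG_KEY_ORDER.length : Int)
  let rank : PySem.Dict String Int :=
    (PySem.List.enumerate CONFIG_KEY_ORDER).foldl (fun r ik => r.insert ik.2 ik.1) PySem.Dict.empty
  let keys := PySem.List.sorted d.keys (fun k =>
    if rank.contains k then toLex (rank.getD k 0, "") else toLex (n, k))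
  keys.map (fun k => (k, d.getD k ""))   -- config[k]; k comes from config, so present

-- ===== PRECONDITION & SPEC =====
-- Pre_ excludes association lists with duplicate keys, which cannot arise from a Python dict
-- (the argument of A); on them the assoc-list encoding has no canonical meaning.
def Pre_ordered_config (config : List (String × String)) : Prop := (config.map Prod.fst).Nodup
instance (config : List (String × String)) : Decidable (Pre_ordered_config config) := by unfold Pre_ordered_config; infer_instance
def pvWitness_ordered_config : (List (String × String)) := [("vocab_size", "32000"), ("aaa", "x")]
def Spec_ordered_config (config : List (String × String)) (out : List (String × String)) : Prop := out = ordered_config_alt config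
instance (config : List (String × String)) (out : List (String × String)) : Decidable (Spec_ordered_config config out) := by unfold Spec_ordered_config; infer_instance

-- ===== CLAIM (what is proved, stated in full; the proofs are below) =====
def Claim_equal_ordered_config : Prop := ∀ (config : List (String × String)), Dom_ordered_config config → Pre_ordered_config config → Spec_ordered_config config (ordered_config config)

-- ===== LEMMAS AND PROOFS =====

-- proof-side names for the two loop bodies of A and B's rank table / sort key (definitionally the port's lambdas)
def pvStep1 (d : PySem.Dict String String) : PySem.Dict String String → String → PySem.Dict String String :=
  fun o key => match d.get? key with | some v => o.insert key v | none => o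

def pvStep2 (d : PySem.Dict String String) : PySem.Dict String String → String → PySem.Dict String String :=
  fun o key => if o.contains key then o else match d.get? key with | some v => o.insert key v | none => o

def pvRank : PySem.Dict String Int :=
  (PySem.List.enumerate CONFIG_KEY_ORDER).foldl (fun r ik => r.insert ik.2 ik.1) PySem.Dict.empty

def pvKeyB : String → Lex (Int × String) :=
  fun k => if pvRank.contains k then toLex (pvRank.getD k 0, "") else toLex ((CONFIG_KEY_ORDER.length : Int), k)

set_option maxRecDepth 100000 in
lemma pvRank_keys : pvRank.keys = CONFIG_KEY_ORDER := by decide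

set_option maxRecDepth 100000 in
lemma pvKO_nodup : CONFIG_KEY_ORDER.Nodup := by decide

lemma pvRank_contains (k : String) : pvRank.contains k = CONFIG_KEY_ORDER.contains k := by
  by_cases h : k ∈ CONFIG_KEY_ORDER
  · have h1 : pvRank.contains k = true :=
      (PySem.Dict.contains_iff_mem_keys pvRank k).mpr (pvRank_keys ▸ h)
    have h2 : CONFIG_KEY_ORDER.contains k = true := List.contains_iff_mem.mpr h
    rw [h1, h2]
  · have h1 : pvRank.contains k = false := by
      rw [Bool.eq_false_iff]
      exact fun hc => h (pvRank_keys ▸ (PySem.Dict.contains_iff_mem_keys pvRank k).mp hc)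
    have h2 : CONFIG_KEY_ORDER.contains k = false := by
      rw [Bool.eq_false_iff]
      exact fun hc => h (List.contains_iff_mem.mp hc)
    rw [h1, h2]

set_option maxRecDepth 100000 in
set_option maxHeartbeats 1000000 in
lemma pvRank_lt (k : String) (h : k ∈ CONFIG_KEY_ORDER) : pvRank.getD k 0 < (CONFIG_KEY_ORDER.length : Int) := by
  revert k; decide

set_option maxRecDepth 100000 in
set_option maxHeartbeats 1000000 in
lemma pvKO_pairwise : CONFIG_KEY_ORDER.Pairwise (fun a b => pvKeyB a < pvKeyB b) := by decide

lemma pv_get?_of_mem_keys (d : PySem.Dict String String) (k : String) (h : k ∈ d.keys) :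
    d.get? k = some (d.getD k "") := by
  have hc : d.contains k = true := (PySem.Dict.contains_iff_mem_keys d k).mpr h
  rw [PySem.Dict.contains_eq_isSome_get?] at hc
  cases hg : d.get? k with
  | none => rw [hg] at hc; simp at hc
  | some v => rw [PySem.Dict.getD_eq_get?_getD, hg]; rfl

lemma pv_contains_fold1 (d : PySem.Dict String String) :
    ∀ (L : List String) (o : PySem.Dict String String) (x : String),
    (L.foldl (pvStep1 d) o).contains x = (o.contains x || (L.contains x && d.contains x)) := by
  intro L
  induction L with
  | nil => simp
  | cons k t ih =>
    intro o x
    rw [List.foldl_cons]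
    cases hg : d.get? k with
    | none =>
      have hdk : d.contains k = false := by
        rw [PySem.Dict.contains_eq_isSome_get?, hg]; rfl
      rw [show pvStep1 d o k = o by simp [pvStep1, hg], ih]
      by_cases hx : x = k
      · subst hx; simp [hdk]
      · simp [List.mem_cons, hx]
    | some v =>
      have hdk : d.contains k = true := by
        rw [PySem.Dict.contains_eq_isSome_get?, hg]; rfl
      rw [show pvStep1 d o k = o.insert k v by simp [pvStep1, hg], ih,
        PySem.Dict.contains_insert]
      by_cases hx : x = k
      · subst hx; simp [hdk, List.mem_cons]
      · simp [List.mem_cons, hx, show (x == k) = false from by simpa using hx]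

lemma pv_items_fold1 (d : PySem.Dict String String) :
    ∀ (L : List String) (o : PySem.Dict String String), L.Nodup → (∀ k ∈ L, o.contains k = false) →
    (L.foldl (pvStep1 d) o).items
      = o.items ++ (L.filter (fun k => d.contains k)).map (fun k => (k, d.getD k "")) := by
  intro L
  induction L with
  | nil => simp
  | cons k t ih =>
    intro o hnd hfresh
    rw [List.foldl_cons]
    cases hg : d.get? k with
    | none =>
      have hdk : d.contains k = false := by
        rw [PySem.Dict.contains_eq_isSome_get?, hg]; rfl
      rw [show pvStep1 d o k = o by simp [pvStep1, hg],
        ih o hnd.of_cons (fun k' hk' => hfresh k' (List.mem_cons_of_mem _ hk'))]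
      simp [hdk]
    | some v =>
      have hdk : d.contains k = true := by
        rw [PySem.Dict.contains_eq_isSome_get?, hg]; rfl
      have hv : v = d.getD k "" := by
        rw [PySem.Dict.getD_eq_get?_getD, hg]; rfl
      have hok : o.contains k = false := hfresh k (List.mem_cons_self ..)
      have hfresh' : ∀ k' ∈ t, (o.insert k v).contains k' = false := by
        intro k' hk'
        rw [PySem.Dict.contains_insert]
        have hne : k' ≠ k := fun h => (List.nodup_cons.mp hnd).1 (h ▸ hk')
        simp [show (k' == k) = false by simpa using hne,
          hfresh k' (List.mem_cons_of_mem _ hk')]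
      rw [show pvStep1 d o k = o.insert k v by simp [pvStep1, hg],
        ih (o.insert k v) hnd.of_cons hfresh',
        PySem.Dict.items_insert_of_not_contains o v hok]
      simp [hdk, hv]

lemma pv_items_fold2 (d : PySem.Dict String String) :
    ∀ (S : List String) (o : PySem.Dict String String), S.Nodup → (∀ k ∈ S, k ∈ d.keys) →
    (S.foldl (pvStep2 d) o).items
      = o.items ++ (S.filter (fun k => !o.contains k)).map (fun k => (k, d.getD k "")) := by
  intro S
  induction S with
  | nil => simp
  | cons k t ih =>
    intro o hnd hmem
    rw [List.foldl_cons]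
    by_cases hc : o.contains k = true
    · rw [show pvStep2 d o k = o by simp [pvStep2, hc],
        ih o hnd.of_cons (fun k' hk' => hmem k' (List.mem_cons_of_mem _ hk'))]
      simp [hc]
    · have hc' : o.contains k = false := by simpa using hc
      have hg : d.get? k = some (d.getD k "") :=
        pv_get?_of_mem_keys d k (hmem k (List.mem_cons_self ..))
      rw [show pvStep2 d o k = o.insert k (d.getD k "") by simp [pvStep2, hc', hg],
        ih _ hnd.of_cons (fun k' hk' => hmem k' (List.mem_cons_of_mem _ hk')),
        PySem.Dict.items_insert_of_not_contains o _ hc']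
      have hfc : t.filter (fun k' => !(o.insert k (d.getD k "")).contains k')
          = t.filter (fun k' => !o.contains k') := by
        apply List.filter_congr
        intro k' hk'
        have hne : k' ≠ k := fun h => (List.nodup_cons.mp hnd).1 (h ▸ hk')
        rw [PySem.Dict.contains_insert]
        simp [show (k' == k) = false by simpa using hne]
      rw [hfc]
      simp [hc']

-- A's result: priority keys present in config (in CONFIG_KEY_ORDER order), then the remaining
-- config keys sorted, each paired with its value.
lemma pv_ordered_config_eq (config : List (String × String))
    (h : (config.map Prod.fst).Nodup) :
    ordered_config config
      = ((CONFIG_KEY_ORDER.filter (fun k => (PySem.Dict.mk config).contains k))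
          ++ (PySem.List.sorted (PySem.Dict.mk config).keys (fun x => x)).filter
              (fun k => !CONFIG_KEY_ORDER.contains k)).map
          (fun k => (k, (PySem.Dict.mk config).getD k "")) := by
  set d := PySem.Dict.mk config with hd
  have hkeys : d.keys = config.map Prod.fst := PySem.Dict.keys_mk config
  have hknd : d.keys.Nodup := hkeys ▸ h
  have hSnd : (PySem.List.sorted d.keys (fun x => x)).Nodup :=
    ((PySem.List.sorted_perm d.keys (fun x => x) false).nodup_iff).mpr hknd
  have hSmem : ∀ k ∈ PySem.List.sorted d.keys (fun x => x), k ∈ d.keys := by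
    intro k hk
    exact (PySem.List.sorted_perm d.keys (fun x => x) false).mem_iff.mp hk
  show ((PySem.List.sorted d.keys (fun x => x)).foldl (pvStep2 d)
      (CONFIG_KEY_ORDER.foldl (pvStep1 d) PySem.Dict.empty)).items = _
  rw [pv_items_fold2 d _ _ hSnd hSmem,
    pv_items_fold1 d _ _ pvKO_nodup (by intro k _; rfl)]
  have hfc : (PySem.List.sorted d.keys (fun x => x)).filter
        (fun k => !(CONFIG_KEY_ORDER.foldl (pvStep1 d) PySem.Dict.empty).contains k)
      = (PySem.List.sorted d.keys (fun x => x)).filter (fun k => !CONFIG_KEY_ORDER.contains k) := by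
    apply List.filter_congr
    intro k hk
    have hdk : d.contains k = true := (PySem.Dict.contains_iff_mem_keys d k).mpr (hSmem k hk)
    rw [pv_contains_fold1]
    simp [hdk]
  rw [hfc]
  simp [PySem.Dict.empty]

-- B's sort produces exactly that key sequence.
set_option maxRecDepth 100000 in
lemma pv_sorted_eq (config : List (String × String))
    (h : (config.map Prod.fst).Nodup) :
    PySem.List.sorted (PySem.Dict.mk config).keys pvKeyB
      = (CONFIG_KEY_ORDER.filter (fun k => (PySem.Dict.mk config).contains k))
          ++ (PySem.List.sorted (PySem.Dict.mk config).keys (fun x => x)).filter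
              (fun k => !CONFIG_KEY_ORDER.contains k) := by
  set d := PySem.Dict.mk config with hd
  have hkeys : d.keys = config.map Prod.fst := PySem.Dict.keys_mk config
  have hknd : d.keys.Nodup := hkeys ▸ h
  have hKOnd : CONFIG_KEY_ORDER.Nodup := pvKO_nodup
  have hSperm : (PySem.List.sorted d.keys (fun x => x)).Perm d.keys :=
    PySem.List.sorted_perm d.keys (fun x => x) false
  apply PySem.List.sorted_eq_of_perm_of_pairwise_lt
  · -- permutation with d.keys
    have h1 : (CONFIG_KEY_ORDER.filter (fun k => d.contains k)).Perm
        (d.keys.filter (fun k => CONFIG_KEY_ORDER.contains k)) := by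
      rw [List.perm_ext_iff_of_nodup (hKOnd.filter _) (hknd.filter _)]
      intro a
      simp only [List.mem_filter, PySem.Dict.contains_iff_mem_keys, List.contains_iff_mem]
      constructor <;> (rintro ⟨x, y⟩; exact ⟨by simpa using y, by simpa using x⟩)
    have h2 : ((PySem.List.sorted d.keys (fun x => x)).filter
          (fun k => !CONFIG_KEY_ORDER.contains k)).Perm
        (d.keys.filter (fun k => !CONFIG_KEY_ORDER.contains k)) :=
      hSperm.filter _
    exact (h1.append h2).trans
      (List.filter_append_perm (fun k => CONFIG_KEY_ORDER.contains k) d.keys)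
  · -- strictly increasing under the sort key
    rw [List.pairwise_append]
    refine ⟨?_, ?_, ?_⟩
    · exact pvKO_pairwise.filter _
    · have hSnd : (PySem.List.sorted d.keys (fun x => x)).Nodup :=
        hSperm.nodup_iff.mpr hknd
      have hSlt : (PySem.List.sorted d.keys (fun x => x)).Pairwise (· < ·) := by
        have hle := PySem.List.sorted_pairwise d.keys (fun x => x)
        exact (hle.and hSnd).imp (fun h => lt_of_le_of_ne h.1 h.2)
      refine (hSlt.filter _).imp_of_mem ?_
      intro a b ha hb hab
      have hna : a ∉ CONFIG_KEY_ORDER := by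
        have := (List.mem_filter.mp ha).2; simpa [List.contains_iff_mem] using this
      have hnb : b ∉ CONFIG_KEY_ORDER := by
        have := (List.mem_filter.mp hb).2; simpa [List.contains_iff_mem] using this
      have hca : pvRank.contains a = false := by
        rw [pvRank_contains]; simpa [List.contains_iff_mem] using hna
      have hcb : pvRank.contains b = false := by
        rw [pvRank_contains]; simpa [List.contains_iff_mem] using hnb
      simp only [pvKeyB, hca, hcb, Bool.false_eq_true, if_false]
      exact Prod.Lex.toLex_lt_toLex.mpr (Or.inr ⟨rfl, hab⟩)
    · intro a ha b hb
      have hma : a ∈ CONFIG_KEY_ORDER := (List.mem_filter.mp ha).1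
      have hnb : b ∉ CONFIG_KEY_ORDER := by
        have := (List.mem_filter.mp hb).2; simpa [List.contains_iff_mem] using this
      have hca : pvRank.contains a = true := by
        rw [pvRank_contains]; exact List.contains_iff_mem.mpr hma
      have hcb : pvRank.contains b = false := by
        rw [pvRank_contains]; simpa [List.contains_iff_mem] using hnb
      simp only [pvKeyB, hca, hcb, Bool.false_eq_true, if_true, if_false]
      exact Prod.Lex.toLex_lt_toLex.mpr (Or.inl (pvRank_lt a hma))

-- ===== VERDICT (by name: the statement is the Claim_ definition above) =====
theorem ordered_config_spec : Claim_equal_ordered_config := by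
  intro config _ hpre
  unfold Spec_ordered_config
  rw [pv_ordered_config_eq config hpre]
  show _ = (PySem.List.sorted (PySem.Dict.mk config).keys pvKeyB).map
    (fun k => (k, (PySem.Dict.mk config).getD k ""))
  rw [pv_sorted_eq config hpre]
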